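-- pv_equiv track=rewrite | github.com/xizhang123/paper_search | dblp_search.py | get_venue_info
-- ===== SOURCE A (Python) =====
-- def kmp_search(text, pattern):
--     if not text or not pattern:
--         return -1
--
--     # 计算部分匹配表
--     def compute_lps(pattern):
--         lps = [0] * len(pattern)
--         length = 0
--         i = 1
--
--         while i < len(pattern):
--             if pattern[i] == pattern[length]:
--                 length += 1
--                 lps[i] = length
--                 i += 1
--             else:
--                 if length != 0:
--                     length = lps[length - 1]
--                 else:
--                     lps[i] = 0
--                     i += 1
--         return lps
--
--     def is_boundary(text, pos):
--         return pos < 0 or pos >= len(text) or text[pos].isspace() or text[pos] in ['2','\'','.','!']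
--
--     lps = compute_lps(pattern)
--     i = j = 0
--
--     while i < len(text):
--         if pattern[j] == text[i]:
--             i += 1
--             j += 1
--             if j == len(pattern):
--                 match_start = i - j
--                 match_end = i
--                 if is_boundary(text, match_start - 1) and is_boundary(text, match_end):
--                     return match_start
--                 j = lps[j - 1]
--         else:
--             if j != 0:
--                 j = lps[j - 1]
--             else:
--                 i += 1
--     return -1
--
-- def get_venue_info(venue_text, abbr_dict, full_dict):
--     venue_info = ('未收录', '', '')
--     matched_venue = None
--
--     if venue_text:
--         venue_text_clean = venue_text.replace('\n', ' ')
--         venue_text_clean = venue_text_clean.replace('  ', ' ')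
--         venue_text_clean = venue_text_clean.replace('  ', ' ')
--         venue_text_clean = venue_text_clean.replace('  ', ' ')
--
--         for abbr, info in abbr_dict.items():
--             if kmp_search(venue_text_clean, abbr) != -1:
--                 venue_info = info
--                 matched_venue = abbr
--                 break
--
--         if venue_info[0] == '未收录':
--             for full_name, info in full_dict.items():
--                 if kmp_search(venue_text_clean, full_name) != -1:
--                     venue_info = info
--                     matched_venue = full_name
--                     break
--
--     return venue_text_clean if venue_text else None, matched_venue, venue_info
-- ===== SOURCE B (Python) =====
-- def get_venue_info(venue_text, abbr_dict, full_dict):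
--     UNLISTED = ('未收录', '', '')
--
--     def ok(text, pos):
--         return pos < 0 or pos >= len(text) or text[pos].isspace() or text[pos] in "2'.!"
--
--     def occurs(text, pat):
--         m = len(pat)
--         if m == 0:
--             return False
--         for k in range(len(text) - m + 1):
--             if text[k:k + m] == pat and ok(text, k - 1) and ok(text, k + m):
--                 return True
--         return False
--
--     if not venue_text:
--         return None, None, UNLISTED
--     text = venue_text.replace('\n', ' ')
--     for _ in range(3):
--         text = text.replace('  ', ' ')
--     hit = next(((k, v) for k, v in abbr_dict.items() if occurs(text, k)), None)
--     if hit is None or hit[1][0] == '未收录':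
--         hit = next(((k, v) for k, v in full_dict.items() if occurs(text, k)), None) or hit
--     if hit is None:
--         return text, None, UNLISTED
--     return text, hit[0], hit[1]
-- ===== Notes on version B (the rewrite author's own statement) =====
-- stated objective: simpler
-- what changed: A hand-rolls a KMP automaton (failure-table construction plus a two-cursor scan that resumes via the table when a boundary check fails) per dictionary key; B replaces all of it with a direct scan over start positions comparing the slice and the two boundary characters, and phrases the two dict loops as first-match selections.
import Mathlib
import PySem

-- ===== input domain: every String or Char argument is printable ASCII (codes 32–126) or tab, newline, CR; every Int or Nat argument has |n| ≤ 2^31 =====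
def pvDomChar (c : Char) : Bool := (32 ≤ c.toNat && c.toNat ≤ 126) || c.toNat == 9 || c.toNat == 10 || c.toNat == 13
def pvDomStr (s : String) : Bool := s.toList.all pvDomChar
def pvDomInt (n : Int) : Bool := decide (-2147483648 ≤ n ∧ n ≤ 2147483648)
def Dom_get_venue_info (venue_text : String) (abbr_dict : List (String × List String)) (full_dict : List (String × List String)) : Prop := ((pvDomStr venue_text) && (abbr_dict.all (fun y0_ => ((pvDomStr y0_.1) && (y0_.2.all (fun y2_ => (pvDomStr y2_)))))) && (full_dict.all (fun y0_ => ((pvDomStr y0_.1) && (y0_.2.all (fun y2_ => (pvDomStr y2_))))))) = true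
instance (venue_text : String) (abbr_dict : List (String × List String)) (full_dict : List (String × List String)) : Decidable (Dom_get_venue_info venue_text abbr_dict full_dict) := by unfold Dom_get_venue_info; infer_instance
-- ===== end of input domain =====

-- B replaces A's per-pattern KMP automaton (failure table + two-cursor scan) by a direct scan over all
-- start positions with a slice comparison (objective: simpler; not faster). Both ports decode the dict
-- arguments with PySem.Dict.ofList (Python dict construction: duplicate keys keep first position, last value).

-- ===== PORT A =====
-- is_boundary: positions reaching the getD are in range (the two decides guard them), so getD is exact
def pvBoundary (t : List Char) (pos : Int) : Bool :=
  decide (pos < 0) || decide ((t.length : Int) ≤ pos) ||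
    (PySem.Chars.isspace (t.getD pos.toNat ' ') || decide (t.getD pos.toNat ' ' ∈ ['2', '\'', '.', '!']))

-- the four .replace calls of get_venue_info, shared by both ports (identical preprocessing in Source A and Source B)
def pvClean (s : List Char) : List Char :=
  PySem.Chars.replace (PySem.Chars.replace (PySem.Chars.replace
    (PySem.Chars.replace s ['\n'] [' ']) [' ', ' '] [' ']) [' ', ' '] [' ']) [' ', ' '] [' ']

-- compute_lps while-loop; fuel 2*len(p) only makes the recursion total (the loop does ≤ 2*len(p) iterations)
def pvLpsLoop (p : List Char) (lps : List Nat) (len i fuel : Nat) : List Nat :=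
  match fuel with
  | 0 => lps
  | fuel + 1 =>
    if i < p.length then
      if p.getD i ' ' = p.getD len ' ' then
        pvLpsLoop p (lps.set i (len + 1)) (len + 1) (i + 1) fuel
      else if len ≠ 0 then
        pvLpsLoop p lps (lps.getD (len - 1) 0) i fuel
      else
        pvLpsLoop p (lps.set i 0) len (i + 1) fuel
    else lps

def pvComputeLps (p : List Char) : List Nat :=
  pvLpsLoop p (List.replicate p.length 0) 0 1 (2 * p.length)

-- kmp_search main while-loop; fuel 2*len(t)+1 only makes the recursion total
def pvKmpLoop (t p : List Char) (lps : List Nat) (i j fuel : Nat) : Int :=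
  match fuel with
  | 0 => -1
  | fuel + 1 =>
    if i < t.length then
      if p.getD j ' ' = t.getD i ' ' then
        if j + 1 = p.length then
          if pvBoundary t ((i : Int) + 1 - ((j : Int) + 1) - 1) && pvBoundary t ((i : Int) + 1) then
            (i : Int) + 1 - ((j : Int) + 1)
          else pvKmpLoop t p lps (i + 1) (lps.getD (j + 1 - 1) 0) fuel
        else pvKmpLoop t p lps (i + 1) (j + 1) fuel
      else if j ≠ 0 then pvKmpLoop t p lps i (lps.getD (j - 1) 0) fuel
      else pvKmpLoop t p lps (i + 1) j fuel
    else -1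

def kmp_search (text pattern : List Char) : Int :=
  if text = [] ∨ pattern = [] then -1
  else pvKmpLoop text pattern (pvComputeLps pattern) 0 0 (2 * text.length + 1)

-- the for-loop with break over a dict's items (first entry whose key kmp-matches)
def pvFindA (t : List Char) (d : List (String × List String)) : Option (String × List String) :=
  match d with
  | [] => none
  | (k, info) :: rest => if kmp_search t k.toList ≠ -1 then some (k, info) else pvFindA t rest

-- venue_info[0] is read via headD ""; inside Pre_ the list read is nonempty (Python raises IndexError outside)
def get_venue_info (venue_text : String) (abbr_dict : List (String × List String)) (full_dict : List (String × List String)) : Option String × Option String × List String :=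
  if venue_text.toList = [] then (none, none, ["未收录", "", ""])
  else
    let t := pvClean venue_text.toList
    let r : Option String × List String :=
      match pvFindA t (PySem.Dict.ofList abbr_dict).items with
      | some (k, info) => (some k, info)
      | none => (none, ["未收录", "", ""])
    if r.2.headD "" = "未收录" then
      match pvFindA t (PySem.Dict.ofList full_dict).items with
      | some (k2, info2) => (some (String.ofList t), some k2, info2)
      | none => (some (String.ofList t), r.1, r.2)
    else (some (String.ofList t), r.1, r.2)

-- ===== PORT B =====
-- occurs: scan every start position k, compare the slice and the two boundary positions
def pvOccursFrom (t p : List Char) (k : Nat) : Bool :=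
  if h : k + p.length ≤ t.length then
    if ((t.drop k).take p.length == p) && pvBoundary t ((k : Int) - 1) && pvBoundary t ((k : Int) + p.length)
    then true
    else pvOccursFrom t p (k + 1)
  else false
termination_by t.length + 1 - k
decreasing_by omega

def pvOccurs (t p : List Char) : Bool :=
  if p.length = 0 then false else pvOccursFrom t p 0

-- next(... if occurs(text, k)), None): first entry whose key occurs with word boundaries
def pvFirstHit (t : List Char) (d : List (String × List String)) : Option (String × List String) :=
  match d with
  | [] => none
  | (k, v) :: rest => if pvOccurs t k.toList then some (k, v) else pvFirstHit t rest

-- hit[1][0] is read via headD ""; inside Pre_ the list read is nonempty (Python raises IndexError outside)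
def get_venue_info_alt (venue_text : String) (abbr_dict : List (String × List String)) (full_dict : List (String × List String)) : Option String × Option String × List String :=
  if venue_text.toList = [] then (none, none, ["未收录", "", ""])
  else
    let t := pvClean venue_text.toList
    let hit := pvFirstHit t (PySem.Dict.ofList abbr_dict).items
    let hit2 :=
      match hit with
      | none => pvFirstHit t (PySem.Dict.ofList full_dict).items
      | some (k, v) =>
        if v.headD "" = "未收录" then
          (pvFirstHit t (PySem.Dict.ofList full_dict).items).orElse (fun _ => some (k, v))
        else some (k, v)
    match hit2 with
    | none => (some (String.ofList t), none, ["未收录", "", ""])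
    | some (k, v) => (some (String.ofList t), some k, v)

-- ===== PRECONDITION & SPEC =====
-- a boundary-delimited occurrence of p at position k of t (what both searches look for)
abbrev pvMatchesAt (t p : List Char) (k : Nat) : Prop :=
  k + p.length ≤ t.length ∧ (t.drop k).take p.length = p ∧
    pvBoundary t ((k : Int) - 1) = true ∧ pvBoundary t ((k : Int) + p.length) = true

-- Pre_ excludes inputs whose abbr dict maps some boundary-matching key to an empty info list: when such
-- an entry is the first match, A (and B) raise IndexError at venue_info[0]; when it is not the first
-- match both return the same ordinary value (see the cite), excluded only for this one simple condition.
def Pre_get_venue_info (venue_text : String) (abbr_dict : List (String × List String)) (full_dict : List (String × List String)) : Prop :=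
  ∀ p ∈ (PySem.Dict.ofList abbr_dict).items,
    (p.1.toList ≠ [] ∧ ∃ k < (pvClean venue_text.toList).length + 1,
        pvMatchesAt (pvClean venue_text.toList) p.1.toList k) → p.2 ≠ []
instance (venue_text : String) (abbr_dict : List (String × List String)) (full_dict : List (String × List String)) : Decidable (Pre_get_venue_info venue_text abbr_dict full_dict) := by unfold Pre_get_venue_info; infer_instance

def pvWitness_get_venue_info : String × (List (String × List String)) × (List (String × List String)) :=
  ("ICML 2024", [("ICML", ["A", "B", "C"])], [])

def Spec_get_venue_info (venue_text : String) (abbr_dict : List (String × List String)) (full_dict : List (String × List String)) (out : Option String × Option String × List String) : Prop := out = get_venue_info_alt venue_text abbr_dict full_dict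
instance (venue_text : String) (abbr_dict : List (String × List String)) (full_dict : List (String × List String)) (out : Option String × Option String × List String) : Decidable (Spec_get_venue_info venue_text abbr_dict full_dict out) := by unfold Spec_get_venue_info; infer_instance

-- ===== CLAIM (what is proved, stated in full; the proofs are below) =====
def Claim_equal_get_venue_info : Prop := ∀ (venue_text : String) (abbr_dict : List (String × List String)) (full_dict : List (String × List String)), Dom_get_venue_info venue_text abbr_dict full_dict → Pre_get_venue_info venue_text abbr_dict full_dict → Spec_get_venue_info venue_text abbr_dict full_dict (get_venue_info venue_text abbr_dict full_dict)

-- ===== LEMMAS AND PROOFS =====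

-- suffix utilities
theorem pv_suffix_append_singleton {a b : List Char} (x : Char) (h : a <:+ b) : a ++ [x] <:+ b ++ [x] := by
  obtain ⟨c, rfl⟩ := h; exact ⟨c, (List.append_assoc _ _ _).symm⟩

theorem pv_suffix_of_suffix_le {a b c : List Char} (ha : a <:+ c) (hb : b <:+ c) (h : a.length ≤ b.length) : a <:+ b := by
  obtain ⟨w, rfl⟩ := hb
  have hal := ha.length_le
  rw [List.suffix_iff_eq_drop] at ha
  have hlen : (w ++ b).length - a.length = w.length + (b.length - a.length) := by
    rw [List.length_append]; omega
  rw [hlen] at ha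
  simp only [List.drop_append, List.drop_eq_nil_of_le (by omega : w.length ≤ w.length + (b.length - a.length)), Nat.add_sub_cancel_left, List.nil_append] at ha
  rw [ha]
  exact List.drop_suffix _ _

theorem pv_take_suffix_take_succ {p t : List Char} {j i : Nat} (hj : j < p.length) (hi : i < t.length)
    (hs : p.take j <:+ t.take i) (hc : p.getD j ' ' = t.getD i ' ') : p.take (j + 1) <:+ t.take (i + 1) := by
  rw [List.take_add_one, List.take_add_one, List.getElem?_eq_getElem hj, List.getElem?_eq_getElem hi]
  simp only [Option.toList_some]
  rw [List.getD_eq_getElem _ _ hj, List.getD_eq_getElem _ _ hi] at hc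
  rw [hc]
  exact pv_suffix_append_singleton _ hs

-- occurrences: slice form ↔ suffix form, and single-character extraction
theorem pv_occ_take_suffix {t p : List Char} {q l : Nat} (ho : (t.drop q).take p.length = p) (hl : l ≤ p.length) :
    p.take l <:+ t.take (q + l) := by
  have : p.take l = (t.take (q + l)).drop q := by
    rw [List.drop_take]
    have : q + l - q = l := by omega
    rw [this, ← ho, List.take_take, min_eq_left hl]
  rw [this]
  exact List.drop_suffix _ _
theorem pv_suffix_to_occ {t p : List Char} {q : Nat} (hq : q + p.length ≤ t.length)
    (hs : p <:+ t.take (q + p.length)) : (t.drop q).take p.length = p := by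
  rw [List.suffix_iff_eq_drop, List.length_take] at hs
  have hmin : min (q + p.length) t.length - p.length = q := by omega
  rw [hmin, List.drop_take] at hs
  have hpl : q + p.length - q = p.length := by omega
  rw [hpl] at hs
  exact hs.symm
theorem pv_occ_getD {t p : List Char} {q : Nat} (hq : q + p.length ≤ t.length)
    (ho : (t.drop q).take p.length = p) {j : Nat} (hj : j < p.length) : p.getD j ' ' = t.getD (q + j) ' ' := by
  have h1 : j < ((t.drop q).take p.length).length := by
    simp only [List.length_take, List.length_drop]; omega
  have h2 : q + j < t.length := by omega
  have h3 : p.getD j ' ' = ((t.drop q).take p.length).getD j ' ' := by rw [ho]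
  rw [h3, List.getD_eq_getElem _ _ h1, List.getD_eq_getElem _ _ h2]
  rw [List.getElem_take, List.getElem_drop]

-- borders
def IsBorder (s : List Char) (l : Nat) : Prop := l < s.length ∧ s.take l <:+ s
def maxBorder (s : List Char) : Nat := Nat.findGreatest (fun l => l < s.length ∧ s.take l <:+ s) (s.length - 1)

theorem isBorder_zero {s : List Char} (h : 0 < s.length) : IsBorder s 0 := ⟨h, by simp⟩
theorem maxBorder_isBorder {s : List Char} (h : 0 < s.length) : IsBorder s (maxBorder s) :=
  Nat.findGreatest_spec (Nat.zero_le _) (isBorder_zero h)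
theorem le_maxBorder {s : List Char} {l : Nat} (hb : IsBorder s l) : l ≤ maxBorder s :=
  Nat.le_findGreatest (by have := hb.1; omega) hb
theorem maxBorder_lt {s : List Char} (h : 0 < s.length) : maxBorder s < s.length := by
  have := Nat.findGreatest_le (P := fun l => l < s.length ∧ s.take l <:+ s) (s.length - 1)
  unfold maxBorder
  omega

theorem isBorder_take_iff {p : List Char} {j l : Nat} (hj : j ≤ p.length) :
    IsBorder (p.take j) l ↔ l < j ∧ p.take l <:+ p.take j := by
  unfold IsBorder
  rw [List.length_take, min_eq_left hj]
  constructor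
  · rintro ⟨h1, h2⟩
    rw [List.take_take, min_eq_left (by omega)] at h2
    exact ⟨h1, h2⟩
  · rintro ⟨h1, h2⟩
    rw [List.take_take, min_eq_left (by omega)]
    exact ⟨h1, h2⟩

-- dropping the last character of a border of s.take (n+1) gives a border of s.take n
theorem border_pop {s : List Char} {n l : Nat} (hl : 1 ≤ l) (hn : n + 1 ≤ s.length)
    (hb : IsBorder (s.take (n + 1)) l) : IsBorder (s.take n) (l - 1) := by
  rw [isBorder_take_iff (by omega)] at hb
  obtain ⟨hlt, hsuf⟩ := hb
  rw [List.suffix_iff_eq_drop, List.length_take, List.length_take] at hsuf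
  have hm : min (n + 1) s.length - min l s.length = n + 1 - l := by omega
  rw [hm] at hsuf
  rw [isBorder_take_iff (by omega)]
  refine ⟨by omega, ?_⟩
  have key : s.take (l - 1) = List.drop (n + 1 - l) (s.take n) := by
    rw [List.drop_take]
    have e1 : n - (n + 1 - l) = l - 1 := by omega
    rw [e1]
    have h4 : List.take (l - 1) (s.take l) = List.take (l - 1) (List.drop (n + 1 - l) (s.take (n + 1))) := by
      rw [hsuf]
    rw [List.take_take, min_eq_left (by omega)] at h4
    rw [List.drop_take, List.take_take] at h4
    have e2 : min (l - 1) (n + 1 - (n + 1 - l)) = l - 1 := by omega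
    rw [e2] at h4
    exact h4
  rw [key]
  exact List.drop_suffix _ _
theorem border_last_char {s : List Char} {n l : Nat} (hl : 1 ≤ l) (hn : n + 1 ≤ s.length)
    (hb : IsBorder (s.take (n + 1)) l) : s.getD (l - 1) ' ' = s.getD n ' ' := by
  rw [isBorder_take_iff (by omega)] at hb
  obtain ⟨hlt, hsuf⟩ := hb
  have hlen_l : (s.take l).length = l := by rw [List.length_take]; omega
  have hlen_n : (s.take (n + 1)).length = n + 1 := by rw [List.length_take]; omega
  have hne : s.take l ≠ [] := by
    intro h; rw [h] at hlen_l; simp at hlen_l; omega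
  have hne2 : s.take (n + 1) ≠ [] := by
    intro h; rw [h] at hlen_n; simp at hlen_n
  have hg := hsuf.getLast hne
  rw [List.getLast_eq_getElem hne, List.getLast_eq_getElem hne2] at hg
  simp only [List.getElem_take, hlen_l, hlen_n, Nat.add_sub_cancel] at hg
  rw [List.getD_eq_getElem _ _ (show l - 1 < s.length by omega),
      List.getD_eq_getElem _ _ (show n < s.length by omega)]
  exact hg


theorem pv_getD_set_self {l : List Nat} {i v : Nat} (h : i < l.length) : (l.set i v).getD i 0 = v := by
  rw [List.getD_eq_getElem?_getD, List.getElem?_set, if_pos rfl, if_pos h, Option.getD_some]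

theorem pv_getD_set_ne {l : List Nat} {i k v : Nat} (h : i ≠ k) : (l.set i v).getD k 0 = l.getD k 0 := by
  rw [List.getD_eq_getElem?_getD, List.getElem?_set, if_neg h, ← List.getD_eq_getElem?_getD]

theorem border_succ_le {p : List Char} {i l : Nat} (him : i + 1 ≤ p.length) (hl : 1 ≤ l)
    (hb : IsBorder (p.take (i + 2)) l) : l - 1 ≤ maxBorder (p.take (i + 1)) := by
  by_cases h : i + 2 ≤ p.length
  · exact le_maxBorder (border_pop hl h hb)
  · have he : p.take (i + 2) = p.take (i + 1) := by
      rw [List.take_of_length_le (by omega), List.take_of_length_le (by omega)]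
    rw [he] at hb
    have := le_maxBorder hb
    omega

theorem lpsLoop_spec (p : List Char) :
    ∀ fuel lps len i,
      1 ≤ i → i ≤ p.length → len < i → lps.length = p.length →
      (∀ k, k < i → lps.getD k 0 = maxBorder (p.take (k + 1))) →
      IsBorder (p.take i) len →
      (∀ l, 1 ≤ l → IsBorder (p.take (i + 1)) l → l ≤ len + 1) →
      2 * (p.length - i) + len + 1 ≤ fuel →
      ∀ k, k < p.length → (pvLpsLoop p lps len i fuel).getD k 0 = maxBorder (p.take (k + 1))
  | 0 => by intro lps len i _ _ _ _ _ _ _ hfuel; omega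
  | fuel + 1 => by
    intro lps len i h1 h2 h3 hlen hc ha hb hfuel k hk
    by_cases hi : i < p.length
    case neg =>
      simp only [pvLpsLoop, if_neg hi]
      exact hc k (by omega)
    case pos =>
    have hlp : len < p.length := by omega
    by_cases hch : p.getD i ' ' = p.getD len ' '
    case pos =>
      -- matched: maxBorder (p.take (i+1)) = len + 1
      have hsuf : p.take len <:+ p.take i := ((isBorder_take_iff (by omega)).mp ha).2
      have hext : p.take (len + 1) <:+ p.take (i + 1) :=
        pv_take_suffix_take_succ hlp hi hsuf hch.symm
      have hbord : IsBorder (p.take (i + 1)) (len + 1) :=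
        (isBorder_take_iff (by omega)).mpr ⟨by omega, hext⟩
      have hmb : maxBorder (p.take (i + 1)) = len + 1 := by
        have hle : len + 1 ≤ maxBorder (p.take (i + 1)) := le_maxBorder hbord
        have hpos : 0 < (p.take (i + 1)).length := by
          rw [List.length_take]; omega
        have hmbord := maxBorder_isBorder hpos
        by_cases h0 : 1 ≤ maxBorder (p.take (i + 1))
        · have := hb _ h0 hmbord
          omega
        · omega
      simp only [pvLpsLoop, if_pos hi, if_pos hch]
      refine lpsLoop_spec p fuel (lps.set i (len + 1)) (len + 1) (i + 1) (by omega) (by omega)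
        (by omega) (by rw [List.length_set]; exact hlen) ?_ hbord ?_ (by omega) k hk
      · intro k' hk'
        by_cases hki : k' = i
        · subst hki
          rw [pv_getD_set_self (by omega), hmb]
        · rw [pv_getD_set_ne (fun h => hki h.symm)]
          exact hc k' (by omega)
      · intro l hl hbl
        have := border_succ_le (by omega) hl hbl
        omega
    case neg =>
    by_cases hlz : len ≠ 0
    case pos =>
      -- jump: len' = lps[len-1] = maxBorder (p.take len)
      have hlen1 : len - 1 + 1 = len := by omega
      have hjmp : lps.getD (len - 1) 0 = maxBorder (p.take len) := by
        rw [hc (len - 1) (by omega), hlen1]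
      have hpos : 0 < (p.take len).length := by rw [List.length_take]; omega
      have hmlt : maxBorder (p.take len) < len := by
        have := maxBorder_lt hpos
        rw [List.length_take] at this
        omega
      have hmbord := maxBorder_isBorder hpos
      have hmsuf : p.take (maxBorder (p.take len)) <:+ p.take len :=
        ((isBorder_take_iff (by omega)).mp hmbord).2
      have hsuf : p.take len <:+ p.take i := ((isBorder_take_iff (by omega)).mp ha).2
      have ha' : IsBorder (p.take i) (maxBorder (p.take len)) :=
        (isBorder_take_iff (by omega)).mpr ⟨by omega, hmsuf.trans hsuf⟩
      simp only [pvLpsLoop, if_pos hi, if_neg hch, if_pos hlz]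
      rw [hjmp]
      refine lpsLoop_spec p fuel lps (maxBorder (p.take len)) i h1 h2 (by omega) hlen hc ha' ?_ (by omega) k hk
      intro l hl hbl
      have hllen : l ≤ len + 1 := hb l hl hbl
      have hlne : l ≠ len + 1 := by
        intro he
        have := border_last_char (s := p) (n := i) (l := l) hl (by omega) hbl
        rw [he, Nat.add_sub_cancel] at this
        exact hch (this.symm)
      have hpop : IsBorder (p.take i) (l - 1) := border_pop hl (by omega) hbl
      by_cases hl1 : l = 1
      · omega
      · have hsufl : p.take (l - 1) <:+ p.take i := ((isBorder_take_iff (by omega)).mp hpop).2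
        have hlenle : (p.take (l - 1)).length ≤ (p.take len).length := by
          rw [List.length_take, List.length_take]; omega
        have hss : p.take (l - 1) <:+ p.take len := pv_suffix_of_suffix_le hsufl hsuf hlenle
        have : IsBorder (p.take len) (l - 1) := (isBorder_take_iff (by omega)).mpr ⟨by omega, hss⟩
        have := le_maxBorder this
        omega
    case neg =>
      -- len = 0, mismatch: maxBorder (p.take (i+1)) = 0
      have hl0 : len = 0 := by omega
      subst hl0
      have hpos : 0 < (p.take (i + 1)).length := by rw [List.length_take]; omega
      have hmb : maxBorder (p.take (i + 1)) = 0 := by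
        by_contra hne
        have h1m : 1 ≤ maxBorder (p.take (i + 1)) := by omega
        have hmbord := maxBorder_isBorder hpos
        have := hb _ h1m hmbord
        have hone : maxBorder (p.take (i + 1)) = 1 := by omega
        rw [hone] at hmbord
        have := border_last_char (s := p) (n := i) (l := 1) (le_refl 1) (by omega) hmbord
        simp only [Nat.sub_self] at this
        exact hch this.symm
      simp only [pvLpsLoop, if_pos hi, if_neg hch, if_neg hlz]
      refine lpsLoop_spec p fuel (lps.set i 0) 0 (i + 1) (by omega) (by omega) (by omega)
        (by rw [List.length_set]; exact hlen) ?_ (isBorder_zero hpos) ?_ (by omega) k hk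
      · intro k' hk'
        by_cases hki : k' = i
        · subst hki
          rw [pv_getD_set_self (by omega), hmb]
        · rw [pv_getD_set_ne (fun h => hki h.symm)]
          exact hc k' (by omega)
      · intro l hl hbl
        have := border_succ_le (by omega) hl hbl
        omega

theorem computeLps_spec (p : List Char) (hp : p ≠ []) :
    ∀ k, k < p.length → (pvComputeLps p).getD k 0 = maxBorder (p.take (k + 1)) := by
  have hm : 0 < p.length := List.length_pos_of_ne_nil hp
  have hone : maxBorder (p.take 1) = 0 := by
    have := Nat.findGreatest_le (P := fun l => l < (p.take 1).length ∧ (p.take 1).take l <:+ p.take 1)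
      ((p.take 1).length - 1)
    have hl1 : (p.take 1).length = 1 := by rw [List.length_take]; omega
    unfold maxBorder
    rw [hl1] at this ⊢
    omega
  intro k hk
  refine lpsLoop_spec p (2 * p.length) (List.replicate p.length 0) 0 1 (le_refl 1) (by omega)
    (by omega) (by rw [List.length_replicate]) ?_ ?_ ?_ (by omega) k hk
  · intro k' hk'
    have hk0 : k' = 0 := by omega
    subst hk0
    rw [List.getD_replicate _ (by omega), hone]
  · exact isBorder_zero (by rw [List.length_take]; omega)
  · intro l hl hbl
    have : l < (p.take 2).length := hbl.1
    rw [List.length_take] at this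
    omega

theorem kmpLoop_iff (t p : List Char) (lps : List Nat)
    (hspec : ∀ k, k < p.length → lps.getD k 0 = maxBorder (p.take (k + 1))) :
    ∀ fuel i j,
      j ≤ i → i ≤ t.length → j < p.length →
      p.take j <:+ t.take i →
      (∀ q, q < i - j → ¬ pvMatchesAt t p q) →
      2 * (t.length - i) + j + 1 ≤ fuel →
      (pvKmpLoop t p lps i j fuel ≠ -1 ↔ ∃ q, pvMatchesAt t p q)
  | 0 => by intro i j _ _ _ _ _ hfuel; omega
  | fuel + 1 => by
    intro i j hji hin hjm hs hnot hfuel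
    by_cases hi : i < t.length
    case neg =>
      -- loop exit: no boundary match exists at all
      simp only [pvKmpLoop, if_neg hi]
      simp only [ne_eq, not_true_eq_false, false_iff, not_exists]
      intro q hq
      have hq1 := hq.1
      exact hnot q (by omega) hq
    case pos =>
    by_cases hch : p.getD j ' ' = t.getD i ' '
    case pos =>
      have hext : p.take (j + 1) <:+ t.take (i + 1) := pv_take_suffix_take_succ hjm hi hs hch
      by_cases hm : j + 1 = p.length
      case pos =>
        -- full match at q0 = i - j
        have hfull : p <:+ t.take (i + 1) := by rw [hm, List.take_length] at hext; exact hext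
        have he : (i - j) + p.length = i + 1 := by omega
        have hocc : (t.drop (i - j)).take p.length = p := by
          refine pv_suffix_to_occ (by omega) ?_
          rw [he]; exact hfull
        have e1 : (i : Int) + 1 - ((j : Int) + 1) - 1 = ((i - j : Nat) : Int) - 1 := by omega
        have e2 : (i : Int) + 1 = ((i - j : Nat) : Int) + (p.length : Int) := by omega
        by_cases hbd : (pvBoundary t ((i : Int) + 1 - ((j : Int) + 1) - 1) && pvBoundary t ((i : Int) + 1)) = true
        case pos =>
          simp only [pvKmpLoop, if_pos hi, if_pos hch, if_pos hm, if_pos hbd]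
          simp only [Bool.and_eq_true] at hbd
          constructor
          · intro _
            refine ⟨i - j, by omega, hocc, ?_, ?_⟩
            · rw [← e1]; exact hbd.1
            · rw [← e2]; exact hbd.2
          · intro _
            omega
        case neg =>
          simp only [pvKmpLoop, if_pos hi, if_pos hch, if_pos hm, if_neg hbd]
          have hj1 : j + 1 - 1 = j := by omega
          have hspecj : lps.getD j 0 = maxBorder p := by
            rw [hspec j hjm]
            congr 1
            rw [hm, List.take_length]
          rw [hj1, hspecj]
          have hp0 : 0 < p.length := by omega
          have hjb := maxBorder_lt hp0
          have hjbsuf : p.take (maxBorder p) <:+ p := (maxBorder_isBorder hp0).2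
          refine kmpLoop_iff t p lps hspec fuel (i + 1) (maxBorder p) (by omega) (by omega) hjb
            (hjbsuf.trans hfull) ?_ (by omega)
          intro q hq hmat
          obtain ⟨hq1, hq2, hq3, hq4⟩ := hmat
          by_cases hlt : q < i - j
          · exact hnot q hlt ⟨hq1, hq2, hq3, hq4⟩
          by_cases hq0 : q = i - j
          · subst hq0
            apply hbd
            rw [Bool.and_eq_true, e1, e2]
            exact ⟨hq3, hq4⟩
          · have hql : i - j < q := by omega
            have hlm : i + 1 - q < p.length := by omega
            have hsl : p.take (i + 1 - q) <:+ t.take (i + 1) := by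
              have hos := pv_occ_take_suffix hq2 (le_of_lt hlm)
              have e3 : q + (i + 1 - q) = i + 1 := by omega
              rwa [e3] at hos
            have hlenle : (p.take (i + 1 - q)).length ≤ p.length := by
              rw [List.length_take]; omega
            have hss : p.take (i + 1 - q) <:+ p := pv_suffix_of_suffix_le hsl hfull hlenle
            have hbord : IsBorder p (i + 1 - q) := ⟨hlm, hss⟩
            have := le_maxBorder hbord
            omega
      case neg =>
        -- partial match continues
        simp only [pvKmpLoop, if_pos hi, if_pos hch, if_neg hm]
        refine kmpLoop_iff t p lps hspec fuel (i + 1) (j + 1) (by omega) (by omega) (by omega) hext ?_ (by omega)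
        intro q hq
        exact hnot q (by omega)
    case neg =>
    by_cases hjz : j ≠ 0
    case pos =>
      have hlen1 : j - 1 + 1 = j := by omega
      have hspecj : lps.getD (j - 1) 0 = maxBorder (p.take j) := by
        rw [hspec (j - 1) (by omega), hlen1]
      have hpos : 0 < (p.take j).length := by rw [List.length_take]; omega
      have hmlt : maxBorder (p.take j) < j := by
        have := maxBorder_lt hpos
        rw [List.length_take] at this
        omega
      have hmsuf : p.take (maxBorder (p.take j)) <:+ p.take j :=
        ((isBorder_take_iff (by omega)).mp (maxBorder_isBorder hpos)).2
      simp only [pvKmpLoop, if_pos hi, if_neg hch, if_pos hjz]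
      rw [hspecj]
      refine kmpLoop_iff t p lps hspec fuel i (maxBorder (p.take j)) (by omega) hin (by omega)
        (hmsuf.trans hs) ?_ (by omega)
      intro q hq hmat
      obtain ⟨hq1, hq2, hq3, hq4⟩ := hmat
      by_cases hlt : q < i - j
      · exact hnot q hlt ⟨hq1, hq2, hq3, hq4⟩
      by_cases hq0 : q = i - j
      · subst hq0
        have hgd := pv_occ_getD hq1 hq2 hjm
        have e3 : i - j + j = i := by omega
        rw [e3] at hgd
        exact hch hgd
      · have hql : i - j < q := by omega
        have hlj : i - q < j := by omega
        have hsl : p.take (i - q) <:+ t.take i := by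
          have hos := pv_occ_take_suffix hq2 (by omega : i - q ≤ p.length)
          have e3 : q + (i - q) = i := by omega
          rwa [e3] at hos
        have hlenle : (p.take (i - q)).length ≤ (p.take j).length := by
          rw [List.length_take, List.length_take]; omega
        have hss : p.take (i - q) <:+ p.take j := pv_suffix_of_suffix_le hsl hs hlenle
        have hbord : IsBorder (p.take j) (i - q) := (isBorder_take_iff (by omega)).mpr ⟨hlj, hss⟩
        have := le_maxBorder hbord
        omega
    case neg =>
      have hj0 : j = 0 := by omega
      subst hj0
      simp only [pvKmpLoop, if_pos hi, if_neg hch, if_neg hjz]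
      refine kmpLoop_iff t p lps hspec fuel (i + 1) 0 (by omega) (by omega) hjm List.nil_suffix ?_ (by omega)
      intro q hq hmat
      by_cases hqi : q < i
      · exact hnot q (by omega) hmat
      · have hq_eq : q = i := by omega
        subst hq_eq
        obtain ⟨hq1, hq2, _, _⟩ := hmat
        have := pv_occ_getD hq1 hq2 (show 0 < p.length by omega)
        rw [Nat.add_zero] at this
        exact hch this


theorem occursFrom_iff (t p : List Char) :
    ∀ n k, t.length + 1 - k ≤ n →
      (pvOccursFrom t p k = true ↔ ∃ q, k ≤ q ∧ pvMatchesAt t p q)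
  | 0, k, h => by
    have hk : t.length < k := by omega
    rw [pvOccursFrom]
    rw [dif_neg (by omega)]
    simp only [Bool.false_eq_true, false_iff, not_exists]
    rintro q ⟨hkq, hmat⟩
    have := hmat.1
    omega
  | n + 1, k, h => by
    rw [pvOccursFrom]
    by_cases hg : k + p.length ≤ t.length
    case neg =>
      rw [dif_neg hg]
      simp only [Bool.false_eq_true, false_iff, not_exists]
      rintro q ⟨hkq, hmat⟩
      have := hmat.1
      omega
    case pos =>
      rw [dif_pos hg]
      by_cases hcond : (((t.drop k).take p.length == p) && pvBoundary t ((k : Int) - 1) && pvBoundary t ((k : Int) + p.length)) = true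
      · rw [if_pos hcond]
        simp only [Bool.and_eq_true, beq_iff_eq] at hcond
        simp only [true_iff]
        exact ⟨k, le_refl k, hg, hcond.1.1, hcond.1.2, hcond.2⟩
      · rw [if_neg hcond]
        rw [occursFrom_iff t p n (k + 1) (by omega)]
        constructor
        · rintro ⟨q, hq, hmat⟩
          exact ⟨q, by omega, hmat⟩
        · rintro ⟨q, hq, hmat⟩
          refine ⟨q, ?_, hmat⟩
          rcases Nat.lt_or_ge k q with hlt | hge
          · omega
          · have hqk : q = k := by omega
            subst hqk
            exfalso
            apply hcond
            obtain ⟨_, h2, h3, h4⟩ := hmat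
            simp only [Bool.and_eq_true, beq_iff_eq]
            exact ⟨⟨h2, h3⟩, h4⟩

theorem search_iff (t p : List Char) : (kmp_search t p ≠ -1) ↔ pvOccurs t p = true := by
  unfold kmp_search pvOccurs
  by_cases hp : p = []
  · subst hp
    simp
  by_cases ht : t = []
  · rw [if_pos (Or.inl ht)]
    subst ht
    rw [if_neg (by simpa using hp)]
    rw [pvOccursFrom]
    rw [dif_neg (by simp [List.length_eq_zero_iff]; exact hp)]
    simp
  · rw [if_neg (by tauto)]
    rw [if_neg (by simpa using hp)]
    have h0p : 0 < p.length := List.length_pos_of_ne_nil hp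
    have hloop := kmpLoop_iff t p (pvComputeLps p) (computeLps_spec p hp) (2 * t.length + 1) 0 0
      (le_refl 0) (Nat.zero_le _) h0p (by simp) (fun q hq => absurd hq (by omega)) (by omega)
    rw [hloop, occursFrom_iff t p (t.length + 1) 0 (by omega)]
    constructor
    · rintro ⟨q, hq⟩
      exact ⟨q, Nat.zero_le q, hq⟩
    · rintro ⟨q, _, hq⟩
      exact ⟨q, hq⟩

theorem find_eq (t : List Char) : ∀ d, pvFindA t d = pvFirstHit t d
  | [] => rfl
  | (k, info) :: rest => by
    simp only [pvFindA, pvFirstHit]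
    by_cases h : pvOccurs t k.toList = true
    · rw [if_pos ((search_iff t k.toList).mpr h), if_pos h]
    · rw [if_neg (fun hh => h ((search_iff t k.toList).mp hh)), if_neg h, find_eq t rest]

theorem ports_eq (venue_text : String) (abbr_dict full_dict : List (String × List String)) :
    get_venue_info venue_text abbr_dict full_dict = get_venue_info_alt venue_text abbr_dict full_dict := by
  unfold get_venue_info get_venue_info_alt
  by_cases hv : venue_text.toList = []
  · rw [if_pos hv, if_pos hv]
  · rw [if_neg hv, if_neg hv]
    simp only [find_eq]
    cases habbr : pvFirstHit (pvClean venue_text.toList) (PySem.Dict.ofList abbr_dict).items with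
    | none =>
      cases hfull : pvFirstHit (pvClean venue_text.toList) (PySem.Dict.ofList full_dict).items with
      | none => simp
      | some kv2 => simp
    | some kv =>
      obtain ⟨k, v⟩ := kv
      dsimp only
      by_cases hh : v.headD "" = "未收录"
      · rw [if_pos hh, if_pos hh]
        cases hfull : pvFirstHit (pvClean venue_text.toList) (PySem.Dict.ofList full_dict).items with
        | none => simp [Option.orElse]
        | some kv2 => simp [Option.orElse]
      · rw [if_neg hh, if_neg hh]

-- ===== VERDICT (by name: the statement is the Claim_ definition above) =====
theorem get_venue_info_spec : Claim_equal_get_venue_info := by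
  intro venue_text abbr_dict full_dict _ _
  unfold Spec_get_venue_info
  exact ports_eq venue_text abbr_dict full_dict
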